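-- pv_equiv track=rewrite | github.com/emkayoh/advent-of-code | day_07/code_07.py | calc_eq
-- ===== SOURCE A (Python) =====
-- def calc_eq(nums, ops):
--     res = nums[0]
--     for i in range(len(ops)):
--         if ops[i] == '+':
--             res += nums[i + 1]
--         else:  # Assume the only other option is '*'
--             res *= nums[i + 1]
--     return res
-- ===== SOURCE B (Python) =====
-- def calc_eq(nums, ops):
--     # Compose the operations right-to-left as one affine map x -> mul*x + add,
--     # then apply it to nums[0].
--     mul, add = 1, 0
--     for i in reversed(range(len(ops))):
--         n = nums[i + 1]
--         if ops[i] == '+':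
--             add += mul * n
--         else:  # '*' (any non-'+' op multiplies, as in A)
--             mul *= n
--     return mul * nums[0] + add
-- ===== Notes on version B (the rewrite author's own statement) =====
-- stated objective: alternative
-- what changed: Instead of folding the running result left-to-right, B composes the operations right-to-left into a single affine map (mul, add) and returns mul*nums[0] + add.
import Mathlib
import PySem

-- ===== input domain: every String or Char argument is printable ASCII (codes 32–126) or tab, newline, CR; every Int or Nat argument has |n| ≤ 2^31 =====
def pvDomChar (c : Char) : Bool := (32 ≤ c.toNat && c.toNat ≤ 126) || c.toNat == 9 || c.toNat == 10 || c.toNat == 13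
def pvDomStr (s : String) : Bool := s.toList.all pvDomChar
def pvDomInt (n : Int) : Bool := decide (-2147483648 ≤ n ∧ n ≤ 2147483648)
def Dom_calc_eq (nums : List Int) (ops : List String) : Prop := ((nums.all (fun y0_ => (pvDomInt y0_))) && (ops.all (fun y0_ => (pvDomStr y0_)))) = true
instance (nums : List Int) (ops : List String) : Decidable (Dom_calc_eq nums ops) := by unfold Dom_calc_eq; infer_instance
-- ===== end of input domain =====

-- B composes the operations right-to-left into one affine map (mul, add) and applies it to nums[0],
-- instead of A's left-to-right fold of the running result; return-value equivalence, no mutation involved.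

-- ===== PORT A =====
-- index loop: for i in range(len(ops)); pyGetD is exact here because Pre_ keeps every index in range
def calc_eq (nums : List Int) (ops : List String) : Int :=
  (PySem.List.pyRange 0 (ops.length : Int) 1).foldl
    (fun res i =>
      if PySem.List.pyGetD ops i "" == "+" then res + PySem.List.pyGetD nums (i + 1) 0
      else res * PySem.List.pyGetD nums (i + 1) 0)
    (PySem.List.pyGetD nums 0 0)

-- ===== PORT B =====
-- reversed(range(len(ops))) is range(len(ops)-1, -1, -1); the loop threads the pair (mul, add)
def calc_eq_alt (nums : List Int) (ops : List String) : Int :=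
  let ma := (PySem.List.pyRange ((ops.length : Int) - 1) (-1) (-1)).foldl
    (fun (ma : Int × Int) i =>
      if PySem.List.pyGetD ops i "" == "+" then (ma.1, ma.2 + ma.1 * PySem.List.pyGetD nums (i + 1) 0)
      else (ma.1 * PySem.List.pyGetD nums (i + 1) 0, ma.2))
    (1, 0)
  ma.1 * PySem.List.pyGetD nums 0 0 + ma.2

-- ===== PRECONDITION & SPEC =====
-- Pre_ excludes exactly the inputs on which A raises IndexError (empty nums at nums[0],
-- or some nums[i+1] out of range because ops is too long).
def Pre_calc_eq (nums : List Int) (ops : List String) : Prop := ops.length < nums.length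
instance (nums : List Int) (ops : List String) : Decidable (Pre_calc_eq nums ops) := by unfold Pre_calc_eq; infer_instance
def pvWitness_calc_eq : List Int × List String := ([2, 3, 4], ["+", "*"])

def Spec_calc_eq (nums : List Int) (ops : List String) (out : Int) : Prop := out = calc_eq_alt nums ops
instance (nums : List Int) (ops : List String) (out : Int) : Decidable (Spec_calc_eq nums ops out) := by unfold Spec_calc_eq; infer_instance

-- ===== CLAIM (what is proved, stated in full; the proofs are below) =====
def Claim_equal_calc_eq : Prop := ∀ (nums : List Int) (ops : List String), Dom_calc_eq nums ops → Pre_calc_eq nums ops → Spec_calc_eq nums ops (calc_eq nums ops)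
-- ===== LEMMAS AND PROOFS =====

-- B's descending fold composes the affine maps of the first j operations; applying the composite
-- to any accumulator equals A's ascending fold of those j operations on that accumulator.
theorem calc_eq_loop (ops : List String) (nums : List Int) :
    ∀ (j : Nat) (acc : Int) (ma : Int × Int),
      ((PySem.List.pyRange ((j : Int) - 1) (-1) (-1)).foldl
          (fun (ma : Int × Int) i =>
            if PySem.List.pyGetD ops i "" == "+" then (ma.1, ma.2 + ma.1 * PySem.List.pyGetD nums (i + 1) 0)
            else (ma.1 * PySem.List.pyGetD nums (i + 1) 0, ma.2)) ma).1 * acc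
      + ((PySem.List.pyRange ((j : Int) - 1) (-1) (-1)).foldl
          (fun (ma : Int × Int) i =>
            if PySem.List.pyGetD ops i "" == "+" then (ma.1, ma.2 + ma.1 * PySem.List.pyGetD nums (i + 1) 0)
            else (ma.1 * PySem.List.pyGetD nums (i + 1) 0, ma.2)) ma).2
      = ma.1 * ((PySem.List.pyRange 0 (j : Int) 1).foldl
          (fun res i =>
            if PySem.List.pyGetD ops i "" == "+" then res + PySem.List.pyGetD nums (i + 1) 0
            else res * PySem.List.pyGetD nums (i + 1) 0) acc) + ma.2 := by
  intro j
  induction j with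
  | zero =>
      intro acc ma
      rw [PySem.List.pyRange_neg_one_eq_nil (by omega), PySem.List.pyRange_one_eq_nil (by omega)]
      simp
  | succ n ih =>
      intro acc ma
      have hc : ((n + 1 : Nat) : Int) - 1 = (n : Int) := by push_cast; ring
      rw [hc, PySem.List.pyRange_neg_one_cons (by omega), List.foldl_cons,
        show ((n + 1 : Nat) : Int) = (n : Int) + 1 by push_cast; ring,
        PySem.List.pyRange_one_succ_right (by omega), List.foldl_append, List.foldl_cons,
        List.foldl_nil, ih]
      by_cases hop : (PySem.List.pyGetD ops (n : Int) "" == "+") = true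
      · simp only [hop, if_pos]; ring
      · simp only [hop, if_neg, Bool.not_eq_true]; ring

-- ===== VERDICT (by name: the statement is the Claim_ definition above) =====
theorem calc_eq_spec : Claim_equal_calc_eq := by
  intro nums ops _ _
  unfold Spec_calc_eq calc_eq calc_eq_alt
  have h := calc_eq_loop ops nums ops.length (PySem.List.pyGetD nums 0 0) (1, 0)
  simp only [one_mul, add_zero] at h
  exact h.symm
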